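-- pv_equiv track=rewrite | github.com/yufeng-yang/DAI | Deep_q_learning.py | get_body_distances
-- ===== SOURCE A (Python) =====
-- def get_body_distances(snake, grid_size):
--     head_x, head_y = snake[0]
--     distances = []
--     directions = [(-1, 0), (1, 0), (0, -1), (0, 1)]  # 上下左右
--     for dx, dy in directions:
--         distance = 0
--         while True:
--             distance += 1
--             nx, ny = head_x + dx * distance, head_y + dy * distance
--             if (nx, ny) in snake[1:] or not (0 <= nx < grid_size and 0 <= ny < grid_size):
--                 break
--         distances.append(distance)
--     return distances
-- ===== SOURCE B (Python) =====
-- def get_body_distances(snake, grid_size):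
--     head_x, head_y = snake[0]
--     body = snake[1:]
--     row = [x for x, y in body if y == head_y]
--     col = [y for x, y in body if x == head_x]
--
--     def exit_step(h, other, s, g):
--         """First t >= 1 at which the ray cell (h + s*t on its axis, other held fixed)
--         lies outside the g x g grid."""
--         if not (0 <= other < g) or not (0 <= h + s < g):
--             return 1
--         return g - h if s > 0 else h + 1
--
--     def ray(h, other, s, cells, g):
--         wall = exit_step(h, other, s, g)
--         steps = [s * (c - h) for c in cells]
--         return min([wall] + [t for t in steps if 0 < t < wall])
--
--     return [ray(head_x, head_y, -1, row, grid_size),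
--             ray(head_x, head_y, 1, row, grid_size),
--             ray(head_y, head_x, -1, col, grid_size),
--             ray(head_y, head_x, 1, col, grid_size)]
-- ===== Notes on version B (the rewrite author's own statement) =====
-- stated objective: faster
-- what changed: A walks each of the four rays cell by cell, re-scanning snake[1:] at every step; B computes the step at which each ray leaves the grid in closed form and takes the min over the signed steps of the body cells on the head's row/column, one pass over the body in total. Pre_ excludes only the empty snake, on which A raises IndexError.
import Mathlib
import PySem

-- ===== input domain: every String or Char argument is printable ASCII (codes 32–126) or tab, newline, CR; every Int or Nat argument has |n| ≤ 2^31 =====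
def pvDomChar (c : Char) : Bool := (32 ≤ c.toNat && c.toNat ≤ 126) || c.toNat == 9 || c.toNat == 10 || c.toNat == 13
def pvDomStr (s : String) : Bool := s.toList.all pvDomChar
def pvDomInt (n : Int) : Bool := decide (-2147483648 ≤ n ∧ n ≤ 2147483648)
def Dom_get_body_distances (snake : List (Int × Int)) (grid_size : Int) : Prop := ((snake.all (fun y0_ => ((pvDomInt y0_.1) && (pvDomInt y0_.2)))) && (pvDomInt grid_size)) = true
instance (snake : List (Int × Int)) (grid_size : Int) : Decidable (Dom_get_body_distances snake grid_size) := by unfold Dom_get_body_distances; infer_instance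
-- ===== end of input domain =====

-- B replaces A's per-step ray walking (a while loop per direction scanning snake[1:] each step)
-- by a closed-form grid-exit step and one min over the body cells on the head's row/column
-- (objective: faster — a single pass over the body instead of a scan per step).

-- ===== PORT A =====
-- the 'while True' loop of A; fuel is a totality guard only (large enough that the
-- out-of-bounds break is always reached before it runs out)
def aLoop (body : List (Int × Int)) (g hx hy dx dy : Int) (distance : Int) : Nat → Int
  | 0 => distance
  | Nat.succ fuel =>
    let d := distance + 1
    let nx := hx + dx * d
    let ny := hy + dy * d
    if (nx, ny) ∈ body ∨ ¬(0 ≤ nx ∧ nx < g ∧ 0 ≤ ny ∧ ny < g) then d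
    else aLoop body g hx hy dx dy d fuel

def get_body_distances (snake : List (Int × Int)) (grid_size : Int) : List Int :=
  match snake with
  | [] => []   -- Python raises IndexError here; excluded by Pre_
  | (hx, hy) :: _ =>
    let fuel := grid_size.natAbs + hx.natAbs + hy.natAbs + 2
    ([((-1 : Int), (0 : Int)), (1, 0), (0, -1), (0, 1)]).foldl
      (fun acc dir => acc ++ [aLoop (snake.drop 1) grid_size hx hy dir.1 dir.2 0 fuel]) []

-- ===== PORT B =====
-- first t ≥ 1 at which the ray cell (h + s*t on its axis, other held fixed) is outside the grid
def exitStep (h other s g : Int) : Int :=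
  if ¬(0 ≤ other ∧ other < g) ∨ ¬(0 ≤ h + s ∧ h + s < g) then 1
  else if s > 0 then g - h else h + 1

-- min([wall] + [t for t in steps if 0 < t < wall])
def ray (h other s : Int) (cells : List Int) (g : Int) : Int :=
  let wall := exitStep h other s g
  ((cells.map (fun c => s * (c - h))).filter
    (fun t => decide (0 < t) && decide (t < wall))).foldl min wall

def get_body_distances_alt (snake : List (Int × Int)) (grid_size : Int) : List Int :=
  match snake with
  | [] => []   -- Python raises IndexError here; excluded by Pre_
  | (hx, hy) :: body =>
    let row := (body.filter (fun p => p.2 == hy)).map Prod.fst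
    let col := (body.filter (fun p => p.1 == hx)).map Prod.snd
    [ray hx hy (-1) row grid_size, ray hx hy 1 row grid_size,
     ray hy hx (-1) col grid_size, ray hy hx 1 col grid_size]

-- ===== PRECONDITION & SPEC =====
-- Pre_ excludes only the empty snake, on which Python A raises IndexError (snake[0]).
def Pre_get_body_distances (snake : List (Int × Int)) (grid_size : Int) : Prop := snake ≠ []
instance (snake : List (Int × Int)) (grid_size : Int) : Decidable (Pre_get_body_distances snake grid_size) := by unfold Pre_get_body_distances; infer_instance
def pvWitness_get_body_distances : (List (Int × Int)) × Int := ([(1, 1), (0, 1)], 4)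

def Spec_get_body_distances (snake : List (Int × Int)) (grid_size : Int) (out : List Int) : Prop := out = get_body_distances_alt snake grid_size
instance (snake : List (Int × Int)) (grid_size : Int) (out : List Int) : Decidable (Spec_get_body_distances snake grid_size out) := by unfold Spec_get_body_distances; infer_instance

-- ===== CLAIM (what is proved, stated in full; the proofs are below) =====
def Claim_equal_get_body_distances : Prop := ∀ (snake : List (Int × Int)) (grid_size : Int), Dom_get_body_distances snake grid_size → Pre_get_body_distances snake grid_size → Spec_get_body_distances snake grid_size (get_body_distances snake grid_size)

-- ===== LEMMAS AND PROOFS =====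

lemma foldl_min_le (L : List Int) : ∀ d : Int, L.foldl min d ≤ d := by
  induction L with
  | nil => intro d; simp
  | cons v tl ih =>
    intro d
    calc tl.foldl min (min d v) ≤ min d v := ih _
      _ ≤ d := min_le_left _ _

lemma foldl_min_mem (L : List Int) : ∀ d : Int, L.foldl min d = d ∨ L.foldl min d ∈ L := by
  induction L with
  | nil => intro d; simp
  | cons v tl ih =>
    intro d
    simp only [List.foldl_cons]
    rcases ih (min d v) with h1 | h2
    · rw [h1]
      rcases min_choice d v with h | h
      · left; exact h
      · right; rw [h]; simp
    · right; exact List.mem_cons_of_mem _ h2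

lemma foldl_min_le_mem (L : List Int) : ∀ d : Int, ∀ v ∈ L, L.foldl min d ≤ v := by
  induction L with
  | nil => intro d v hv; simp at hv
  | cons w tl ih =>
    intro d v hv
    simp only [List.foldl_cons]
    rcases List.mem_cons.mp hv with rfl | hv'
    · calc tl.foldl min (min d v) ≤ min d v := foldl_min_le tl _
        _ ≤ v := min_le_right _ _
    · exact ih _ v hv'

lemma exitStep_pos (h other s g : Int) (hs : s = 1 ∨ s = -1) : 1 ≤ exitStep h other s g := by
  rcases hs with rfl | rfl <;> simp only [exitStep] <;> split_ifs <;> omega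

lemma exitStep_le (h other s g : Int) (hs : s = 1 ∨ s = -1) :
    exitStep h other s g ≤ (g.natAbs : Int) + h.natAbs + 1 := by
  rcases hs with rfl | rfl <;> simp only [exitStep] <;> split_ifs <;> omega

lemma exitStep_break (h other s g : Int) (hs : s = 1 ∨ s = -1) :
    ¬(0 ≤ h + s * exitStep h other s g ∧ h + s * exitStep h other s g < g ∧
      0 ≤ other ∧ other < g) := by
  rcases hs with rfl | rfl <;> simp only [exitStep] <;> split_ifs <;> omega

lemma exitStep_inb (h other s g : Int) (hs : s = 1 ∨ s = -1) (t : Int) (ht1 : 1 ≤ t)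
    (ht2 : t < exitStep h other s g) :
    0 ≤ h + s * t ∧ h + s * t < g ∧ 0 ≤ other ∧ other < g := by
  rcases hs with rfl | rfl <;> simp only [exitStep] at ht2 <;> split_ifs at ht2 <;> omega

lemma ray_le_wall (h other s : Int) (cells : List Int) (g : Int) :
    ray h other s cells g ≤ exitStep h other s g := foldl_min_le _ _

lemma ray_pos (h other s : Int) (cells : List Int) (g : Int) (hs : s = 1 ∨ s = -1) :
    1 ≤ ray h other s cells g := by
  have hw := exitStep_pos h other s g hs
  rcases foldl_min_mem ((cells.map (fun c => s * (c - h))).filter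
      (fun t => decide (0 < t) && decide (t < exitStep h other s g))) (exitStep h other s g)
    with h1 | h2
  · simpa [ray, h1] using hw
  · have := List.of_mem_filter h2
    simp only [Bool.and_eq_true, decide_eq_true_eq] at this
    simpa [ray] using this.1

lemma ray_mem (h other s : Int) (cells : List Int) (g : Int) :
    ray h other s cells g = exitStep h other s g ∨
      ∃ v ∈ cells, s * (v - h) = ray h other s cells g ∧
        ray h other s cells g < exitStep h other s g := by
  rcases foldl_min_mem ((cells.map (fun c => s * (c - h))).filter
      (fun t => decide (0 < t) && decide (t < exitStep h other s g))) (exitStep h other s g)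
    with h1 | h2
  · left; simpa [ray] using h1
  · right
    have hmem := List.mem_of_mem_filter h2
    have hcond := List.of_mem_filter h2
    simp only [Bool.and_eq_true, decide_eq_true_eq] at hcond
    obtain ⟨v, hv, he⟩ := List.mem_map.mp hmem
    exact ⟨v, hv, by simpa [ray] using he, by simpa [ray] using hcond.2⟩

lemma ray_le_cand (h other s : Int) (cells : List Int) (g : Int) (v : Int) (hv : v ∈ cells)
    (hp : 0 < s * (v - h)) : ray h other s cells g ≤ s * (v - h) := by
  by_cases hlt : s * (v - h) < exitStep h other s g
  · apply foldl_min_le_mem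
    apply List.mem_filter.mpr
    refine ⟨List.mem_map.mpr ⟨v, hv, rfl⟩, ?_⟩
    simp [hp, hlt]
  · exact le_trans (ray_le_wall h other s cells g) (by omega)

lemma aLoop_eq (body : List (Int × Int)) (g hx hy dx dy T : Int)
    (hbrk : (hx + dx * T, hy + dy * T) ∈ body ∨
      ¬(0 ≤ hx + dx * T ∧ hx + dx * T < g ∧ 0 ≤ hy + dy * T ∧ hy + dy * T < g))
    (hno : ∀ t, 0 < t → t < T → ¬((hx + dx * t, hy + dy * t) ∈ body ∨
      ¬(0 ≤ hx + dx * t ∧ hx + dx * t < g ∧ 0 ≤ hy + dy * t ∧ hy + dy * t < g))) :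
    ∀ (fuel : Nat) (d : Int), 0 ≤ d → d < T → T ≤ d + fuel →
      aLoop body g hx hy dx dy d fuel = T := by
  intro fuel
  induction fuel with
  | zero => intro d h0 h1 h2; exfalso; omega
  | succ fuel ih =>
    intro d h0 h1 h2
    simp only [aLoop]
    by_cases he : d + 1 = T
    · rw [he, if_pos hbrk]
    · rw [if_neg (hno (d + 1) (by omega) (by omega))]
      exact ih (d + 1) (by omega) (by omega) (by push_cast at h2 ⊢; omega)

lemma mem_row (body : List (Int × Int)) (c x : Int) :
    x ∈ (body.filter (fun p => p.2 == c)).map Prod.fst ↔ (x, c) ∈ body := by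
  simp only [List.mem_map, List.mem_filter, beq_iff_eq]
  constructor
  · rintro ⟨⟨a, b⟩, ⟨hm, hb⟩, rfl⟩
    simp only at hb; subst hb; exact hm
  · intro hm; exact ⟨(x, c), ⟨hm, rfl⟩, rfl⟩

lemma mem_col (body : List (Int × Int)) (c y : Int) :
    y ∈ (body.filter (fun p => p.1 == c)).map Prod.snd ↔ (c, y) ∈ body := by
  simp only [List.mem_map, List.mem_filter, beq_iff_eq]
  constructor
  · rintro ⟨⟨a, b⟩, ⟨hm, ha⟩, rfl⟩
    simp only at ha; subst ha; exact hm
  · intro hm; exact ⟨(c, y), ⟨hm, rfl⟩, rfl⟩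

lemma dir_eq_x (body : List (Int × Int)) (g hx hy s : Int) (hs : s = 1 ∨ s = -1)
    (fuel : Nat) (hf : g.natAbs + hx.natAbs + 1 ≤ fuel) :
    aLoop body g hx hy s 0 0 fuel =
      ray hx hy s ((body.filter (fun p => p.2 == hy)).map Prod.fst) g := by
  set vs := (body.filter (fun p => p.2 == hy)).map Prod.fst with hvs
  set T := ray hx hy s vs g with hT
  have hpos := ray_pos hx hy s vs g hs
  have hle := ray_le_wall hx hy s vs g
  have hwle := exitStep_le hx hy s g hs
  apply aLoop_eq
  · rcases ray_mem hx hy s vs g with h1 | ⟨v, hv, he, _⟩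
    · right
      have hb := exitStep_break hx hy s g hs
      rw [← h1, ← hT] at hb
      simpa [show hy + 0 * T = hy by ring] using hb
    · left
      have hvx : v = hx + s * T := by rcases hs with rfl | rfl <;> omega
      have : (v, hy) ∈ body := (mem_row body hy v).mp hv
      simpa [hvx, show hy + 0 * T = hy by ring] using this
  · intro t ht0 hlt
    push Not
    constructor
    · intro hm
      have hmv : hx + s * t ∈ vs := by
        rw [hvs, mem_row]
        simpa [show hy + 0 * t = hy by ring] using hm
      have hstep : 0 < s * ((hx + s * t) - hx) := by
        rcases hs with rfl | rfl <;> omega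
      have := ray_le_cand hx hy s vs g _ hmv hstep
      rcases hs with rfl | rfl <;> omega
    · have hib := exitStep_inb hx hy s g hs t (by omega) (by omega)
      simpa [show hy + 0 * t = hy by ring] using hib
  · omega
  · omega
  · omega

lemma dir_eq_y (body : List (Int × Int)) (g hx hy s : Int) (hs : s = 1 ∨ s = -1)
    (fuel : Nat) (hf : g.natAbs + hy.natAbs + 1 ≤ fuel) :
    aLoop body g hx hy 0 s 0 fuel =
      ray hy hx s ((body.filter (fun p => p.1 == hx)).map Prod.snd) g := by
  set vs := (body.filter (fun p => p.1 == hx)).map Prod.snd with hvs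
  set T := ray hy hx s vs g with hT
  have hpos := ray_pos hy hx s vs g hs
  have hle := ray_le_wall hy hx s vs g
  have hwle := exitStep_le hy hx s g hs
  apply aLoop_eq
  · rcases ray_mem hy hx s vs g with h1 | ⟨v, hv, he, _⟩
    · right
      have hb := exitStep_break hy hx s g hs
      rw [← h1, ← hT] at hb
      simp only [show hx + 0 * T = hx by ring]
      intro ⟨a, b, c, d⟩; exact hb ⟨c, d, a, b⟩
    · left
      have hvy : v = hy + s * T := by rcases hs with rfl | rfl <;> omega
      have : (hx, v) ∈ body := (mem_col body hx v).mp hv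
      simpa [hvy, show hx + 0 * T = hx by ring] using this
  · intro t ht0 hlt
    push Not
    constructor
    · intro hm
      have hmv : hy + s * t ∈ vs := by
        rw [hvs, mem_col]
        simpa [show hx + 0 * t = hx by ring] using hm
      have hstep : 0 < s * ((hy + s * t) - hy) := by
        rcases hs with rfl | rfl <;> omega
      have := ray_le_cand hy hx s vs g _ hmv hstep
      rcases hs with rfl | rfl <;> omega
    · have hib := exitStep_inb hy hx s g hs t (by omega) (by omega)
      obtain ⟨a, b, c, d⟩ := hib
      simp only [show hx + 0 * t = hx by ring]
      exact ⟨c, d, a, b⟩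
  · omega
  · omega
  · omega

-- ===== VERDICT (by name: the statement is the Claim_ definition above) =====
theorem get_body_distances_spec : Claim_equal_get_body_distances := by
  intro snake g _ hpre
  unfold Spec_get_body_distances
  match snake, hpre with
  | (hx, hy) :: body, _ =>
    simp only [get_body_distances, get_body_distances_alt, List.foldl_cons, List.foldl_nil,
      List.drop_one, List.tail_cons, List.nil_append, List.cons_append]
    rw [dir_eq_x body g hx hy (-1) (Or.inr rfl) _ (by omega),
        dir_eq_x body g hx hy 1 (Or.inl rfl) _ (by omega),
        dir_eq_y body g hx hy (-1) (Or.inr rfl) _ (by omega),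
        dir_eq_y body g hx hy 1 (Or.inl rfl) _ (by omega)]
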